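-- pv_equiv track=rewrite | github.com/VitalikSay/old-ReelsMaster | main.py | CheckDistBetweenWilds
-- ===== SOURCE A (Python) =====
-- def CheckDistBetweenWilds(cur_reel, wild_symb, min_step_between_wilds):
--     if wild_symb not in cur_reel:
--         return True
--     wild_indexes = []
--     for i in range(len(cur_reel)):
--         if cur_reel[i] == wild_symb:
--             wild_indexes.append(i)
--
--     for i in range(len(wild_indexes)-1):
--         if wild_indexes[i+1] - wild_indexes[i] < min_step_between_wilds:
--             return False
--         continue
--
--     if len(cur_reel) - 1 - wild_indexes[-1] + wild_indexes[0] < min_step_between_wilds: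
--         return False
--     return True
-- ===== SOURCE B (Python) =====
-- def CheckDistBetweenWilds(cur_reel, wild_symb, min_step_between_wilds):
--     # single streaming pass: carry (first_wild_pos, prev_wild_pos); no index list is built
--     state = None
--     for pos, symb in enumerate(cur_reel):
--         if symb == wild_symb:
--             if state is None:
--                 state = (pos, pos)
--             else:
--                 first, prev = state
--                 if pos - prev < min_step_between_wilds:
--                     return False
--                 state = (first, pos)
--     if state is None:
--         return True
--     first, prev = state
--     return len(cur_reel) - 1 - prev + first >= min_step_between_wilds
-- ===== Notes on version B (the rewrite author's own statement) =====
-- stated objective: alternative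
-- what changed: Replaces A's staged passes (membership guard, build a wild-index list, loop over index pairs, dedicated wraparound branch) by one streaming pass over the reel carrying only a (first_wild, prev_wild) pair, checking each gap as the next wild is encountered and doing the wraparound check from the carried state; no index list is built.
import Mathlib
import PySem

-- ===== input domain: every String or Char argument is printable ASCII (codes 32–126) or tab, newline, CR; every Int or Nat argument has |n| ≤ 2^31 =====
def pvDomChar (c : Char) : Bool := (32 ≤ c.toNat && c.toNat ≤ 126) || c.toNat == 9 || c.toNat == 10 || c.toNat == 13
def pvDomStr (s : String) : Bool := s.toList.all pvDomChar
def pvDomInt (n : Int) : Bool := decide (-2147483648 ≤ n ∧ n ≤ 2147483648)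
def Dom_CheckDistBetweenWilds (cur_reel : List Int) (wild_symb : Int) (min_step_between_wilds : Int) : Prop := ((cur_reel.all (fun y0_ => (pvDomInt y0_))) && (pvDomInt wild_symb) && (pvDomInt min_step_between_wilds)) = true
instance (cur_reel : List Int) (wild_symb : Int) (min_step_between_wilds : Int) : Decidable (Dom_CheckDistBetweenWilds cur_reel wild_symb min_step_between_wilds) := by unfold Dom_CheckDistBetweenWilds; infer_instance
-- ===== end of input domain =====

-- B replaces A's staged passes (build index list, then check pairs, then wraparound branch)
-- by one streaming pass carrying only the (first wild, previous wild) positions (objective: alternative).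

-- ===== PORT A =====
def CheckDistBetweenWilds (cur_reel : List Int) (wild_symb : Int) (min_step_between_wilds : Int) : Bool :=
  if !(cur_reel.contains wild_symb) then true
  else
    -- first loop: collect the wild indexes (range(len(cur_reel)) with in-range indexing)
    let wild_indexes : List Int :=
      (PySem.List.pyRange 0 (cur_reel.length : Int) 1).foldl
        (fun acc i => if PySem.List.pyGetD cur_reel i 0 == wild_symb then acc ++ [i] else acc) []
    -- second loop; the early 'return False' is carried as a Bool accumulator
    let ok : Bool :=
      (PySem.List.pyRange 0 ((wild_indexes.length : Int) - 1) 1).foldl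
        (fun ok i => ok && !(decide (PySem.List.pyGetD wild_indexes (i + 1) 0 -
                                     PySem.List.pyGetD wild_indexes i 0 < min_step_between_wilds))) true
    if !ok then false
    else if (cur_reel.length : Int) - 1 - PySem.List.pyGetD wild_indexes (-1) 0 +
              PySem.List.pyGetD wild_indexes 0 0 < min_step_between_wilds then false
    else true

-- ===== PORT B =====
-- B's streaming loop: walk the reel at position pos carrying the optional (first, prev)
-- wild positions; 'none' result = Python's early 'return False'.
def pvScan (w m : Int) : List Int → Int → Option (Int × Int) → Option (Option (Int × Int))
  | [], _, st => some st
  | s :: t, pos, st =>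
    if s == w then
      match st with
      | none => pvScan w m t (pos + 1) (some (pos, pos))
      | some (first, prev) =>
        if pos - prev < m then none
        else pvScan w m t (pos + 1) (some (first, pos))
    else pvScan w m t (pos + 1) st

def CheckDistBetweenWilds_alt (cur_reel : List Int) (wild_symb : Int) (min_step_between_wilds : Int) : Bool :=
  match pvScan wild_symb min_step_between_wilds cur_reel 0 none with
  | none => false
  | some none => true
  | some (some (first, prev)) =>
      decide ((cur_reel.length : Int) - 1 - prev + first ≥ min_step_between_wilds)

-- ===== PRECONDITION & SPEC =====
def Spec_CheckDistBetweenWilds (cur_reel : List Int) (wild_symb : Int) (min_step_between_wilds : Int) (out : Bool) : Prop := out = CheckDistBetweenWilds_alt cur_reel wild_symb min_step_between_wilds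
instance (cur_reel : List Int) (wild_symb : Int) (min_step_between_wilds : Int) (out : Bool) : Decidable (Spec_CheckDistBetweenWilds cur_reel wild_symb min_step_between_wilds out) := by unfold Spec_CheckDistBetweenWilds; infer_instance

-- ===== CLAIM (what is proved, stated in full; the proofs are below) =====
def Claim_equal_CheckDistBetweenWilds : Prop := ∀ (cur_reel : List Int) (wild_symb : Int) (min_step_between_wilds : Int), Dom_CheckDistBetweenWilds cur_reel wild_symb min_step_between_wilds → Spec_CheckDistBetweenWilds cur_reel wild_symb min_step_between_wilds (CheckDistBetweenWilds cur_reel wild_symb min_step_between_wilds)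

-- ===== LEMMAS AND PROOFS =====

-- adjacent-gap check on a list of wild indexes: the common semantic core
def pvAdjOK (m : Int) : List Int → Bool
  | a :: b :: t => decide (m ≤ b - a) && pvAdjOK m (b :: t)
  | _ => true

-- the wild-index list of l when l starts at absolute position pos
def pvIdx (w : Int) : List Int → Int → List Int
  | [], _ => []
  | s :: t, pos => if s == w then pos :: pvIdx w t (pos + 1) else pvIdx w t (pos + 1)

theorem pv_not_lt (x y : Int) : (!decide (x < y)) = decide (y ≤ x) := by
  rw [← decide_not, decide_eq_decide]
  omega

theorem pv_foldl_and {α : Type} (f : α → Bool) :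
    ∀ (l : List α) (b : Bool), l.foldl (fun ok x => ok && f x) b = (b && l.all f) := by
  intro l
  induction l with
  | nil => simp
  | cons x t ih => intro b; simp [List.foldl_cons, ih, Bool.and_assoc]

-- A's second loop, reduced to Nat-indexed form, computes pvAdjOK
theorem pv_range_nat_all_eq_adjOK (m : Int) :
    ∀ (l : List Int),
      ((List.range (l.length - 1)).all
        (fun k => !decide (l.getD (k + 1) 0 - l.getD k 0 < m))) = pvAdjOK m l := by
  intro l
  induction l with
  | nil => simp [pvAdjOK]
  | cons a t ih =>
    cases t with
    | nil => simp [pvAdjOK]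
    | cons b t' =>
      have hlen : (a :: b :: t').length - 1 = ((b :: t').length - 1) + 1 := by
        simp
      rw [hlen, List.range_succ_eq_map, List.all_cons, List.all_map]
      rw [show pvAdjOK m (a :: b :: t') = (decide (m ≤ b - a) && pvAdjOK m (b :: t')) from rfl]
      rw [← ih]
      rw [show ((a :: b :: t').getD (0 + 1) 0) = b from rfl,
          show ((a :: b :: t').getD 0 0) = a from rfl, pv_not_lt]
      congr 1

-- A's second loop over range(len(wild_indexes)-1) computes pvAdjOK
theorem pv_range_all_eq_adjOK (m : Int) (l : List Int) :
      ((PySem.List.pyRange 0 ((l.length : Int) - 1) 1).all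
        (fun i => !(decide (PySem.List.pyGetD l (i + 1) 0 - PySem.List.pyGetD l i 0 < m))))
      = pvAdjOK m l := by
  rw [PySem.List.pyRange_one, List.all_map, ← pv_range_nat_all_eq_adjOK m l]
  have htn : ((l.length : Int) - 1 - 0).toNat = l.length - 1 := by omega
  rw [htn]
  refine List.all_congr rfl (fun k => ?_)
  simp only [Function.comp]
  have e1 : (k : Int) + 1 = ((k + 1 : Nat) : Int) := by push_cast; ring
  have e2 : (0 : Int) + (k : Int) = ((k : Nat) : Int) := by omega
  simp only [e2, e1, PySem.List.pyGetD_natCast]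

-- A's first loop builds exactly the wild-index list pvIdx
theorem pv_enum_eq_idx (w : Int) :
    ∀ (l : List Int) (pos : Int),
      ((PySem.List.enumerate l pos).filter (fun p => p.2 == w)).map (fun p => p.1)
        = pvIdx w l pos := by
  intro l
  induction l with
  | nil => intro pos; simp [PySem.List.enumerate_nil, pvIdx]
  | cons s t ih =>
    intro pos
    rw [PySem.List.enumerate_cons]
    by_cases hs : s = w
    · simp [pvIdx, hs, ih]
    · simp [pvIdx, hs, ih]

theorem pv_indexes_eq (cur_reel : List Int) (w : Int) :
    (PySem.List.pyRange 0 (cur_reel.length : Int) 1).foldl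
        (fun acc i => if PySem.List.pyGetD cur_reel i 0 == w then acc ++ [i] else acc) []
    = pvIdx w cur_reel 0 := by
  rw [← pv_enum_eq_idx w cur_reel 0]
  rw [PySem.List.enumerate_eq_map_pyRange (d := 0), List.filter_map, List.map_map]
  rw [PySem.List.foldl_append_if (p := fun i => PySem.List.pyGetD cur_reel i 0 == w) (f := fun i => i)]
  simp [Function.comp_def]

theorem pv_mem_iff_idx_ne_nil (cur_reel : List Int) (w : Int) :
    (w ∈ cur_reel) ↔ pvIdx w cur_reel 0 ≠ [] := by
  rw [← pv_enum_eq_idx w cur_reel 0]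
  constructor
  · intro hmem hnil
    rw [List.map_eq_nil_iff, List.filter_eq_nil_iff] at hnil
    have : w ∈ (PySem.List.enumerate cur_reel 0).map (fun p => p.2) := by
      rw [PySem.List.map_snd_enumerate]; exact hmem
    obtain ⟨p, hp, hpw⟩ := List.mem_map.mp this
    exact absurd (by simp [hpw]) (hnil p hp)
  · intro hne
    rcases List.exists_mem_of_ne_nil _ hne with ⟨i, hi⟩
    obtain ⟨p, hp, rfl⟩ := List.mem_map.mp hi
    have hpw : p.2 = w := by
      have := List.mem_filter.mp hp
      simpa using this.2
    have : p.2 ∈ (PySem.List.enumerate cur_reel 0).map (fun q => q.2) :=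
      List.mem_map.mpr ⟨p, (List.mem_filter.mp hp).1, rfl⟩
    rw [PySem.List.map_snd_enumerate] at this
    rwa [hpw] at this

-- B's scan from a live state (f, p) checks pvAdjOK on p followed by the remaining wilds
theorem pv_scan_some (w m : Int) :
    ∀ (l : List Int) (pos f p : Int),
      pvScan w m l pos (some (f, p))
        = if pvAdjOK m (p :: pvIdx w l pos) then
            some (some (f, (p :: pvIdx w l pos).getLast (by simp)))
          else none := by
  intro l
  induction l with
  | nil => intro pos f p; simp [pvScan, pvIdx, pvAdjOK]
  | cons s t ih =>
    intro pos f p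
    by_cases hs : s = w
    · simp only [pvScan, pvIdx, hs, beq_self_eq_true, if_true]
      by_cases hlt : pos - p < m
      · rw [if_pos hlt]
        rw [show pvAdjOK m (p :: pos :: pvIdx w t (pos + 1))
              = (decide (m ≤ pos - p) && pvAdjOK m (pos :: pvIdx w t (pos + 1))) from rfl]
        rw [if_neg (by simp; omega)]
      · rw [if_neg hlt, ih]
        rw [show pvAdjOK m (p :: pos :: pvIdx w t (pos + 1))
              = (decide (m ≤ pos - p) && pvAdjOK m (pos :: pvIdx w t (pos + 1))) from rfl]
        rw [decide_eq_true (by omega : m ≤ pos - p), Bool.true_and]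
        conv_rhs => rw [List.getLast_cons (by simp : (pos :: pvIdx w t (pos + 1)) ≠ [])]
    · simp only [pvScan, pvIdx, hs, beq_iff_eq, if_false]
      exact ih (pos + 1) f p

-- the verdict B computes from the final scan state, as a function of the wild-index list
def pvFinish (m : Int) : List Int → Option (Option (Int × Int))
  | [] => some none
  | i :: r => if pvAdjOK m (i :: r) then
                some (some (i, (i :: r).getLast (by simp)))
              else none

-- B's scan from the empty state, in terms of the wild-index list
theorem pv_scan_none (w m : Int) :
    ∀ (l : List Int) (pos : Int),
      pvScan w m l pos none = pvFinish m (pvIdx w l pos) := by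
  intro l
  induction l with
  | nil => intro pos; simp [pvScan, pvIdx, pvFinish]
  | cons s t ih =>
    intro pos
    by_cases hs : s = w
    · simp only [pvScan, pvIdx, hs, beq_self_eq_true, if_true, pvFinish]
      exact pv_scan_some w m t (pos + 1) pos pos
    · simp only [pvScan, pvIdx, hs, beq_iff_eq, if_false]
      exact ih (pos + 1)

-- ===== VERDICT (by name: the statement is the Claim_ definition above) =====
theorem CheckDistBetweenWilds_spec : Claim_equal_CheckDistBetweenWilds := by
  intro cur_reel w m _
  unfold Spec_CheckDistBetweenWilds
  simp only [CheckDistBetweenWilds, CheckDistBetweenWilds_alt]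
  rw [pv_indexes_eq, pv_scan_none]
  by_cases hmem : w ∈ cur_reel
  · have hne := (pv_mem_iff_idx_ne_nil cur_reel w).mp hmem
    rw [if_neg (by simp [hmem])]
    obtain ⟨i0, rest, hcons⟩ := List.exists_cons_of_ne_nil hne
    rw [hcons]
    simp only [pvFinish]
    rw [pv_foldl_and, Bool.true_and, pv_range_all_eq_adjOK m (i0 :: rest)]
    rw [PySem.List.pyGetD_neg_one (h := by simp), PySem.List.pyGetD_zero_cons]
    cases hadj : pvAdjOK m (i0 :: rest) with
    | false => simp
    | true =>
      simp only [if_true, Bool.not_true, Bool.false_eq_true, if_false]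
      split_ifs with hc
      · rw [eq_comm, decide_eq_false_iff_not]
        omega
      · rw [eq_comm, decide_eq_true_eq]
        omega
  · have hnil : pvIdx w cur_reel 0 = [] := by
      by_contra hne
      exact hmem ((pv_mem_iff_idx_ne_nil cur_reel w).mpr hne)
    rw [if_pos (by simp [hmem]), hnil]
    rfl
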